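-- pv_equiv track=rewrite | github.com/antilneeraj/GFG-POTD | POTD Solutions/21_04_2023_PrefixSuffixString.py | prefixSuffixString
-- ===== SOURCE A (Python) =====
-- def prefixSuffixString(s1, s2) -> int:
--     mm = {}
--     for x in s1:
--         temp = ""
--         for i in range(len(x)):
--             temp += x[i]
--             mm[temp] = True
--         temp = ""
--         for i in range(len(x)-1, -1, -1):
--             temp = x[i] + temp
--             mm[temp] = True
--     ans = 0
--     for x in s2:
--         if x in mm:
--             ans += 1
--     return ans
-- ===== SOURCE B (Python) =====
-- def prefixSuffixString(s1, s2) -> int: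
--     # Build the set of all (nonempty) prefixes and suffixes of s1's words by direct
--     # slicing, then count s2 words by set membership.
--     subs = set()
--     for w in s1:
--         for i in range(len(w)):
--             subs.add(w[:i + 1])
--             subs.add(w[i:])
--     return sum(x in subs for x in s2)
-- ===== Notes on version B (the rewrite author's own statement) =====
-- stated objective: simpler
-- what changed: A builds each prefix and suffix character by character with two directional index loops, repeated string concatenation and a dict of flags; B takes each affix in one shot as a slice, collects them in a set in a single inner loop, and counts s2 by a membership sum.
import Mathlib
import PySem

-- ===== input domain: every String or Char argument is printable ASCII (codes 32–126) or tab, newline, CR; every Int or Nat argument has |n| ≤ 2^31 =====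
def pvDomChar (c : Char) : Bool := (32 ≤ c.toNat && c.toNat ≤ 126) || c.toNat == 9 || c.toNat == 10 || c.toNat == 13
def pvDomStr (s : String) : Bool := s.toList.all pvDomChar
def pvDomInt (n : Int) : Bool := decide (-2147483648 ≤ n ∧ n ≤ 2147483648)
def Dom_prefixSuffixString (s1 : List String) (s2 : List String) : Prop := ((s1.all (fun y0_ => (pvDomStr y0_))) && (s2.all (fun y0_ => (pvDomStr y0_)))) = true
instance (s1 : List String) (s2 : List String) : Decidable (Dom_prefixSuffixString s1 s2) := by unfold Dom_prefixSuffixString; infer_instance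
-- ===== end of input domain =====

-- B replaces A's character-by-character affix building (two directional index loops, repeated
-- concatenation, a dict of flags) by direct slicing into a set in one inner loop (objective: simpler).

-- ===== PORT A =====
-- strings are handled as their code-point lists; A's dict keys are the accumulated `temp` strings.
-- body of the first inner loop: `temp += x[i]; mm[temp] = True`
def pvF (st : List Char × PySem.Dict (List Char) Bool) (c : Char) : List Char × PySem.Dict (List Char) Bool :=
  (st.1 ++ [c], st.2.insert (st.1 ++ [c]) true)

-- body of the second inner loop: `temp = x[i] + temp; mm[temp] = True`
def pvG (st : List Char × PySem.Dict (List Char) Bool) (c : Char) : List Char × PySem.Dict (List Char) Bool :=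
  (c :: st.1, st.2.insert (c :: st.1) true)

-- body of A's outer `for x in s1` loop: the two index loops (indices are in range, so pyGetD is exact)
def pvAWord (mm : PySem.Dict (List Char) Bool) (x : String) : PySem.Dict (List Char) Bool :=
  let cs := x.toList
  let st1 := (PySem.List.pyRange 0 (cs.length : Int) 1).foldl
      (fun st i => pvF st (PySem.List.pyGetD cs i ' ')) ([], mm)
  let st2 := (PySem.List.pyRange ((cs.length : Int) - 1) (-1) (-1)).foldl
      (fun st i => pvG st (PySem.List.pyGetD cs i ' ')) ([], st1.2)
  st2.2

def prefixSuffixString (s1 : List String) (s2 : List String) : Int :=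
  let mm := s1.foldl pvAWord PySem.Dict.empty
  s2.foldl (fun ans x => if mm.contains x.toList then ans + 1 else ans) 0

-- ===== PORT B =====
-- body of B's `for w in s1` loop: `for i in range(len(w)): subs.add(w[:i+1]); subs.add(w[i:])`
def pvBWord (subs : PySem.Set String) (w : String) : PySem.Set String :=
  (PySem.List.pyRange 0 (w.toList.length : Int) 1).foldl
    (fun s i => (s.add (PySem.Str.slice w none (some (i + 1)))).add (PySem.Str.slice w (some i) none)) subs

def prefixSuffixString_alt (s1 : List String) (s2 : List String) : Int :=
  let subs := s1.foldl pvBWord PySem.Set.empty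
  s2.foldl (fun ans x => if PySem.Set.contains subs x then ans + 1 else ans) 0

-- ===== PRECONDITION & SPEC =====
def Spec_prefixSuffixString (s1 : List String) (s2 : List String) (out : Int) : Prop := out = prefixSuffixString_alt s1 s2
instance (s1 : List String) (s2 : List String) (out : Int) : Decidable (Spec_prefixSuffixString s1 s2 out) := by unfold Spec_prefixSuffixString; infer_instance

-- ===== CLAIM (what is proved, stated in full; the proofs are below) =====
def Claim_equal_prefixSuffixString : Prop := ∀ (s1 : List String) (s2 : List String), Dom_prefixSuffixString s1 s2 → Spec_prefixSuffixString s1 s2 (prefixSuffixString s1 s2)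

-- ===== LEMMAS AND PROOFS =====

-- invariant of A's first inner loop: the dict gains exactly the keys t0 ++ (nonempty prefix of cs)
theorem contains_foldl_pvF : ∀ (cs t0 : List Char) (d : PySem.Dict (List Char) Bool) (k : List Char),
    ((cs.foldl pvF (t0, d)).2.contains k = true) ↔
      (d.contains k = true ∨ ∃ n, n < cs.length ∧ k = t0 ++ cs.take (n + 1)) := by
  intro cs
  induction cs with
  | nil => intro t0 d k; simp
  | cons c cs ih =>
    intro t0 d k
    simp only [List.foldl_cons, pvF]
    rw [ih]
    rw [PySem.Dict.contains_insert]
    constructor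
    · rintro (h | ⟨n, hn, rfl⟩)
      · rcases (by simpa using h : k = t0 ++ [c] ∨ d.contains k = true) with h | h
        · exact Or.inr ⟨0, by simp, by simp [h]⟩
        · exact Or.inl h
      · exact Or.inr ⟨n + 1, by simp; omega, by simp⟩
    · rintro (h | ⟨n, hn, rfl⟩)
      · exact Or.inl (by simp [h])
      · cases n with
        | zero => exact Or.inl (by simp)
        | succ m => exact Or.inr ⟨m, by simp at hn ⊢; omega, by simp⟩

-- invariant of A's second inner loop (it consumes cs.reverse): keys (rcs.take (n+1)).reverse ++ t0
theorem contains_foldl_pvG : ∀ (rcs t0 : List Char) (d : PySem.Dict (List Char) Bool) (k : List Char),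
    ((rcs.foldl pvG (t0, d)).2.contains k = true) ↔
      (d.contains k = true ∨ ∃ n, n < rcs.length ∧ k = (rcs.take (n + 1)).reverse ++ t0) := by
  intro rcs
  induction rcs with
  | nil => intro t0 d k; simp
  | cons c cs ih =>
    intro t0 d k
    simp only [List.foldl_cons, pvG]
    rw [ih]
    rw [PySem.Dict.contains_insert]
    constructor
    · rintro (h | ⟨n, hn, rfl⟩)
      · rcases (by simpa using h : k = c :: t0 ∨ d.contains k = true) with h | h
        · exact Or.inr ⟨0, by simp, by simp [h]⟩
        · exact Or.inl h
      · exact Or.inr ⟨n + 1, by simp; omega, by simp⟩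
    · rintro (h | ⟨n, hn, rfl⟩)
      · exact Or.inl (by simp [h])
      · cases n with
        | zero => exact Or.inl (by simp)
        | succ m => exact Or.inr ⟨m, by simp at hn ⊢; omega, by simp⟩

-- nonempty takes of cs are exactly its nonempty prefixes
theorem pv_take_pref (cs k : List Char) :
    (∃ n, n < cs.length ∧ k = cs.take (n + 1)) ↔ (k ≠ [] ∧ k <+: cs) := by
  constructor
  · rintro ⟨n, hn, rfl⟩
    refine ⟨?_, List.take_prefix _ _⟩
    apply List.ne_nil_of_length_pos
    rw [List.length_take]; omega
  · rintro ⟨hne, hp⟩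
    have hk := List.prefix_iff_eq_take.mp hp
    have hle := hp.length_le
    have hpos : 0 < k.length := List.length_pos_iff.mpr hne
    have he : k.length - 1 + 1 = k.length := by omega
    exact ⟨k.length - 1, by omega, by rw [he]; exact hk⟩

-- reversed nonempty takes of cs.reverse are exactly cs's nonempty suffixes
theorem pv_take_suff (cs k : List Char) :
    (∃ n, n < cs.reverse.length ∧ k = (cs.reverse.take (n + 1)).reverse) ↔ (k ≠ [] ∧ k <:+ cs) := by
  have h := pv_take_pref cs.reverse k.reverse
  simp only [List.length_reverse] at h ⊢
  constructor
  · rintro ⟨n, hn, rfl⟩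
    have := h.mp ⟨n, by simpa using hn, by simp⟩
    refine ⟨by simpa using this.1, ?_⟩
    rw [← List.reverse_prefix] ; exact this.2
  · rintro ⟨hne, hs⟩
    obtain ⟨n, hn, he⟩ := h.mpr ⟨by simpa using hne, by rw [List.reverse_prefix]; exact hs⟩
    exact ⟨n, by simpa using hn, by rw [← he]; simp⟩

-- proper drops of cs are exactly its nonempty suffixes
theorem pv_drop_suff (cs k : List Char) :
    (∃ n, n < cs.length ∧ k = cs.drop n) ↔ (k ≠ [] ∧ k <:+ cs) := by
  constructor
  · rintro ⟨n, hn, rfl⟩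
    refine ⟨?_, List.drop_suffix _ _⟩
    apply List.ne_nil_of_length_pos
    rw [List.length_drop]; omega
  · rintro ⟨hne, hs⟩
    have hk := List.suffix_iff_eq_drop.mp hs
    have hle := hs.length_le
    have hpos : 0 < k.length := List.length_pos_iff.mpr hne
    exact ⟨cs.length - k.length, by omega, hk⟩

-- the two range-index loops of pvAWord are the foldl of pvF over cs and of pvG over cs.reverse
theorem pvAWord_eq (mm : PySem.Dict (List Char) Bool) (x : String) :
    pvAWord mm x = (x.toList.reverse.foldl pvG ([], (x.toList.foldl pvF ([], mm)).2)).2 := by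
  unfold pvAWord
  dsimp only
  rw [PySem.List.foldl_pyRange_zero_pyGetD' x.toList ' ' pvF ([], mm)]
  rw [PySem.List.pyRange_neg_one_eq_reverse]
  rw [show ((-1:Int)+1) = 0 by norm_num, show ((x.toList.length:Int)-1)+1 = (x.toList.length:Int) by ring]
  rw [← List.foldl_map, List.map_reverse, PySem.List.map_pyGetD_pyRange_zero']

-- one word of s1 contributes exactly its nonempty prefixes and suffixes to A's dict
theorem contains_pvAWord (mm : PySem.Dict (List Char) Bool) (x : String) (k : List Char) :
    ((pvAWord mm x).contains k = true) ↔
      (mm.contains k = true ∨ (k ≠ [] ∧ (k <+: x.toList ∨ k <:+ x.toList))) := by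
  rw [pvAWord_eq, contains_foldl_pvG, contains_foldl_pvF]
  simp only [List.append_nil, List.nil_append]
  rw [pv_take_suff, pv_take_pref]
  tauto

-- characterisation of A's dict mm after the whole outer loop
theorem contains_foldl_pvAWord : ∀ (s1 : List String) (mm : PySem.Dict (List Char) Bool) (k : List Char),
    ((s1.foldl pvAWord mm).contains k = true) ↔
      (mm.contains k = true ∨ ∃ w ∈ s1, k ≠ [] ∧ (k <+: w.toList ∨ k <:+ w.toList)) := by
  intro s1
  induction s1 with
  | nil => intro mm k; simp
  | cons w s1 ih =>
    intro mm k
    simp only [List.foldl_cons]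
    rw [ih, contains_pvAWord]
    simp only [List.mem_cons]
    constructor
    · rintro ((h | h) | ⟨v, hv, h⟩)
      · exact Or.inl h
      · exact Or.inr ⟨w, Or.inl rfl, h⟩
      · exact Or.inr ⟨v, Or.inr hv, h⟩
    · rintro (h | ⟨v, (rfl | hv), h⟩)
      · exact Or.inl (Or.inl h)
      · exact Or.inl (Or.inr h)
      · exact Or.inr ⟨v, hv, h⟩

theorem pv_toList_inj (x y : String) : x = y ↔ x.toList = y.toList := by
  constructor
  · intro h; rw [h]
  · intro h; have := congrArg String.ofList h; simpa [String.ofList_toList] using this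

theorem pv_slice_pref (w : String) (i : Nat) :
    (PySem.Str.slice w none (some ((i:Int) + 1))).toList = w.toList.take (i+1) := by
  simp only [PySem.Str.toList_slice, PySem.Chars.slice_eq_listSlice]
  rw [show ((i:Int) + 1) = ((i+1 : Nat) : Int) by push_cast; ring, PySem.List.slice_to_natCast]

theorem pv_slice_suff (w : String) (i : Nat) :
    (PySem.Str.slice w (some (i:Int)) none).toList = w.toList.drop i := by
  simp [PySem.Str.toList_slice]

-- one word of s1 contributes exactly its nonempty take/drop slices to B's set
theorem mem_pvBWord (subs : PySem.Set String) (w : String) (k : String) :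
    (k ∈ pvBWord subs w) ↔
      (k ∈ subs ∨ ∃ i, i < w.toList.length ∧
        (k.toList = w.toList.take (i+1) ∨ k.toList = w.toList.drop i)) := by
  have H : ∀ (n : Nat) (subs : PySem.Set String),
      (k ∈ (List.range n).foldl
        (fun s (j : Nat) => (s.add (PySem.Str.slice w none (some ((j:Int) + 1)))).add (PySem.Str.slice w (some (j:Int)) none)) subs) ↔
      (k ∈ subs ∨ ∃ i, i < n ∧ (k = PySem.Str.slice w none (some ((i:Int) + 1)) ∨ k = PySem.Str.slice w (some (i:Int)) none)) := by
    intro n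
    induction n with
    | zero => intro subs; simp
    | succ m ih =>
      intro subs
      rw [List.range_succ, List.foldl_append]
      simp only [List.foldl_cons, List.foldl_nil, PySem.Set.mem_add]
      rw [ih]
      constructor
      · intro h
        rcases h with ((h | ⟨i, hi, h⟩) | h) | h
        · exact Or.inl h
        · exact Or.inr ⟨i, by omega, h⟩
        · exact Or.inr ⟨m, by omega, Or.inl h⟩
        · exact Or.inr ⟨m, by omega, Or.inr h⟩
      · intro h
        rcases h with h | ⟨i, hi, h⟩
        · exact Or.inl (Or.inl (Or.inl h))
        · rcases Nat.lt_succ_iff_lt_or_eq.mp hi with hlt | rfl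
          · exact Or.inl (Or.inl (Or.inr ⟨i, hlt, h⟩))
          · rcases h with h | h
            · exact Or.inl (Or.inr h)
            · exact Or.inr h
  unfold pvBWord
  rw [PySem.List.pyRange_zero_natCast, List.foldl_map, H]
  constructor
  · rintro (h | ⟨i, hi, h⟩)
    · exact Or.inl h
    · refine Or.inr ⟨i, hi, ?_⟩
      rcases h with rfl | rfl
      · exact Or.inl (pv_slice_pref w i)
      · exact Or.inr (pv_slice_suff w i)
  · rintro (h | ⟨i, hi, h⟩)
    · exact Or.inl h
    · refine Or.inr ⟨i, hi, ?_⟩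
      rcases h with h | h
      · exact Or.inl ((pv_toList_inj _ _).mpr (by rw [h, pv_slice_pref]))
      · exact Or.inr ((pv_toList_inj _ _).mpr (by rw [h, pv_slice_suff]))

-- take/drop slice membership, rephrased as nonempty prefix/suffix
theorem pv_affix (w k : List Char) :
    (∃ i, i < w.length ∧ (k = w.take (i + 1) ∨ k = w.drop i)) ↔
      (k ≠ [] ∧ (k <+: w ∨ k <:+ w)) := by
  constructor
  · rintro ⟨i, hi, h | h⟩
    · have := (pv_take_pref w k).mp ⟨i, hi, h⟩
      exact ⟨this.1, Or.inl this.2⟩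
    · have := (pv_drop_suff w k).mp ⟨i, hi, h⟩
      exact ⟨this.1, Or.inr this.2⟩
  · rintro ⟨hne, h | h⟩
    · obtain ⟨i, hi, he⟩ := (pv_take_pref w k).mpr ⟨hne, h⟩
      exact ⟨i, hi, Or.inl he⟩
    · obtain ⟨i, hi, he⟩ := (pv_drop_suff w k).mpr ⟨hne, h⟩
      exact ⟨i, hi, Or.inr he⟩

-- characterisation of B's set after the whole outer loop: same condition as A's dict
theorem mem_foldl_pvBWord : ∀ (s1 : List String) (subs : PySem.Set String) (k : String),
    (k ∈ s1.foldl pvBWord subs) ↔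
      (k ∈ subs ∨ ∃ w ∈ s1, k.toList ≠ [] ∧ (k.toList <+: w.toList ∨ k.toList <:+ w.toList)) := by
  intro s1
  induction s1 with
  | nil => intro subs k; simp
  | cons w s1 ih =>
    intro subs k
    simp only [List.foldl_cons, List.mem_cons]
    rw [ih, mem_pvBWord, pv_affix]
    constructor
    · rintro ((h | h) | ⟨v, hv, h⟩)
      · exact Or.inl h
      · exact Or.inr ⟨w, Or.inl rfl, h⟩
      · exact Or.inr ⟨v, Or.inr hv, h⟩
    · rintro (h | ⟨v, (rfl | hv), h⟩)
      · exact Or.inl (Or.inl h)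
      · exact Or.inl (Or.inr h)
      · exact Or.inr ⟨v, hv, h⟩

theorem pv_set_contains (s : PySem.Set String) (x : String) :
    PySem.Set.contains s x = true ↔ x ∈ s := by
  simp [PySem.Set.contains]

-- two 0/1-counting folds agree when their predicates agree on the list's members
theorem count_congr : ∀ (l : List String) (p q : String → Bool), (∀ x ∈ l, p x = q x) → ∀ (acc : Int),
    l.foldl (fun ans x => if p x then ans + 1 else ans) acc
      = l.foldl (fun ans x => if q x then ans + 1 else ans) acc := by
  intro l
  induction l with
  | nil => intro p q h acc; rfl
  | cons x l ih =>
    intro p q h acc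
    simp only [List.foldl_cons]
    rw [h x (by simp)]
    exact ih p q (fun y hy => h y (by simp [hy])) _

theorem pv_final (s1 s2 : List String) :
    prefixSuffixString s1 s2 = prefixSuffixString_alt s1 s2 := by
  unfold prefixSuffixString prefixSuffixString_alt
  dsimp only
  apply count_congr
  intro x _
  rw [Bool.eq_iff_iff, contains_foldl_pvAWord, pv_set_contains, mem_foldl_pvBWord]
  simp

-- ===== VERDICT (by name: the statement is the Claim_ definition above) =====
theorem prefixSuffixString_spec : Claim_equal_prefixSuffixString := by
  intro s1 s2 _
  exact pv_final s1 s2
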